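-- pv_equiv track=rewrite | github.com/eligof/ScanSage-MCP | tests/test_nmap_ingest_limits.py | _build_hosts
-- ===== SOURCE A (Python) =====
-- def _build_hosts(host_count: int, ports_per_host: int) -> str:
--     """Build a simple XML payload with the requested hosts and ports."""
--
--     hosts = []
--     for idx in range(host_count):
--         port_lines = []
--         for port in range(ports_per_host):
--             number = port + 1
--             port_lines.append(
--                 f"""      <port protocol="tcp" portid="{number}">
--         <state state="open"/>
--         <service name="svc{number}"/>
--       </port>"""
--             )
--         hosts.append(
--             f"""  <host>
--     <address addr="192.0.2.{idx + 1}" addrtype="ipv4"/>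
--     <ports>
-- {chr(10).join(port_lines)}
--     </ports>
--   </host>"""
--         )
--     return "<nmaprun>\n" + "\n".join(hosts) + "\n</nmaprun>"
-- ===== SOURCE B (Python) =====
-- def _build_hosts(host_count: int, ports_per_host: int) -> str:
--     """Build a simple XML payload with the requested hosts and ports."""
--
--     if host_count <= 0:
--         return "<nmaprun>\n\n</nmaprun>"
--     ports_block = "\n".join(
--         f'      <port protocol="tcp" portid="{p + 1}">\n'
--         f'        <state state="open"/>\n'
--         f'        <service name="svc{p + 1}"/>\n'
--         f'      </port>'
--         for p in range(ports_per_host)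
--     )
--     hosts = "\n".join(
--         f'  <host>\n'
--         f'    <address addr="192.0.2.{i + 1}" addrtype="ipv4"/>\n'
--         f'    <ports>\n'
--         f'{ports_block}\n'
--         f'    </ports>\n'
--         f'  </host>'
--         for i in range(host_count)
--     )
--     return "<nmaprun>\n" + hosts + "\n</nmaprun>"
-- ===== Notes on version B (the rewrite author's own statement) =====
-- stated objective: alternative
-- what changed: The loop-invariant ports block (identical for every host) is computed once outside the host loop and interpolated into each host template, instead of being rebuilt line by line inside every host iteration.
import Mathlib
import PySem

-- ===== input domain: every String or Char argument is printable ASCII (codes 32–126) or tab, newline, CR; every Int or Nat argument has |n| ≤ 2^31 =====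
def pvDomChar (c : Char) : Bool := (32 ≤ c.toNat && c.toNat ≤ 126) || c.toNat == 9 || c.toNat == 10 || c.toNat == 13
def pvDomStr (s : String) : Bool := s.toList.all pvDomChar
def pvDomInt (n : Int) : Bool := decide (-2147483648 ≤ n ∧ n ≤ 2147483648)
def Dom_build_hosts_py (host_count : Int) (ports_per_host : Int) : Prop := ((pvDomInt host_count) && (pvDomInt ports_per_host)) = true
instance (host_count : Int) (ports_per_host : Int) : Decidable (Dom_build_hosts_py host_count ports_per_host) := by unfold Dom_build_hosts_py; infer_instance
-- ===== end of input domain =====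

-- B hoists the per-host ports block (which never depends on the host index) out of the host loop and builds it once; objective: alternative decomposition.

-- ===== PORT A =====
def build_hosts_py (host_count : Int) (ports_per_host : Int) : String :=
  let hosts := (PySem.List.pyRange 0 host_count 1).foldl (fun hosts idx =>
    let port_lines := (PySem.List.pyRange 0 ports_per_host 1).foldl (fun pls port =>
      let number := port + 1
      pls ++ ["      <port protocol=\"tcp\" portid=\"" ++ PySem.Int.toStr number ++ "\">\n        <state state=\"open\"/>\n        <service name=\"svc" ++ PySem.Int.toStr number ++ "\"/>\n      </port>"]) []
    hosts ++ ["  <host>\n    <address addr=\"192.0.2." ++ PySem.Int.toStr (idx + 1) ++ "\" addrtype=\"ipv4\"/>\n    <ports>\n" ++ PySem.Str.join "\n" port_lines ++ "\n    </ports>\n  </host>"]) []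
  "<nmaprun>\n" ++ PySem.Str.join "\n" hosts ++ "\n</nmaprun>"

-- ===== PORT B =====
def build_hosts_py_alt (host_count : Int) (ports_per_host : Int) : String :=
  if host_count ≤ 0 then "<nmaprun>\n\n</nmaprun>" else
  let ports_block := PySem.Str.join "\n" ((PySem.List.pyRange 0 ports_per_host 1).map (fun p =>
    "      <port protocol=\"tcp\" portid=\"" ++ PySem.Int.toStr (p + 1) ++ "\">\n        <state state=\"open\"/>\n        <service name=\"svc" ++ PySem.Int.toStr (p + 1) ++ "\"/>\n      </port>"))
  let hosts := PySem.Str.join "\n" ((PySem.List.pyRange 0 host_count 1).map (fun i =>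
    "  <host>\n    <address addr=\"192.0.2." ++ PySem.Int.toStr (i + 1) ++ "\" addrtype=\"ipv4\"/>\n    <ports>\n" ++ ports_block ++ "\n    </ports>\n  </host>"))
  "<nmaprun>\n" ++ hosts ++ "\n</nmaprun>"

-- ===== PRECONDITION & SPEC =====
def Spec_build_hosts_py (host_count : Int) (ports_per_host : Int) (out : String) : Prop := out = build_hosts_py_alt host_count ports_per_host
instance (host_count : Int) (ports_per_host : Int) (out : String) : Decidable (Spec_build_hosts_py host_count ports_per_host out) := by unfold Spec_build_hosts_py; infer_instance

-- ===== CLAIM (what is proved, stated in full; the proofs are below) =====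
def Claim_equal_build_hosts_py : Prop := ∀ (host_count : Int) (ports_per_host : Int), Dom_build_hosts_py host_count ports_per_host → Spec_build_hosts_py host_count ports_per_host (build_hosts_py host_count ports_per_host)

-- ===== LEMMAS AND PROOFS =====

-- ===== VERDICT (by name: the statement is the Claim_ definition above) =====
theorem build_hosts_py_spec : Claim_equal_build_hosts_py := by
  intro h p _
  unfold Spec_build_hosts_py build_hosts_py build_hosts_py_alt
  by_cases hle : h ≤ 0
  · have hr : PySem.List.pyRange 0 h 1 = [] := by
      rw [PySem.List.pyRange_one]
      simp
      omega
    simp [hr, hle, PySem.Str.join]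
  · simp only [PySem.List.foldl_append_singleton_eq_map, List.nil_append, if_neg hle]
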